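-- pv_equiv track=rewrite | github.com/koboltze-py/Nesk-Word | _erstelle_word_beispiele2.py | gruppiere_nach_zeit
-- ===== SOURCE A (Python) =====
-- from collections import defaultdict
--
-- def gruppiere_nach_zeit(personen, ist_dispo=False):
--     """Gibt sortiertes dict {zeitschlüssel: [namen]} zurück."""
--     gruppen = defaultdict(list)
--     for p in personen:
--         if p.get('ist_krank') in (True, 'True'): continue
--         start = (p.get('start_zeit') or '')[:5]
--         end   = (p.get('end_zeit')   or '')[:5]
--         if ist_dispo:
--             if start and ':' in start: start = f"{int(start.split(':')[0]):02d}:00"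
--             if end   and ':' in end:   end   = f"{int(end.split(':')[0]):02d}:00"
--         key = f"{start} – {end}"
--         gruppen[key].append(p.get('anzeigename',''))
--     return dict(sorted(gruppen.items()))
-- ===== SOURCE B (Python) =====
-- def _fenster(roh, ist_dispo):
--     t = (roh or '')[:5]
--     if ist_dispo and ':' in t:
--         t = '%02d:00' % int(t.split(':')[0])
--     return t
--
-- def gruppiere_nach_zeit(personen, ist_dispo=False):
--     """Gibt sortiertes dict {zeitschlüssel: [namen]} zurück."""
--     gruppen = []  # stets nach Schlüssel aufsteigend sortierte Liste von (schluessel, namen)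
--     for p in personen:
--         if p.get('ist_krank') in (True, 'True'):
--             continue
--         key = "%s – %s" % (_fenster(p.get('start_zeit'), ist_dispo),
--                            _fenster(p.get('end_zeit'), ist_dispo))
--         name = p.get('anzeigename', '')
--         i = 0
--         while i < len(gruppen) and gruppen[i][0] < key:
--             i += 1
--         if i < len(gruppen) and gruppen[i][0] == key:
--             gruppen[i][1].append(name)
--         else:
--             gruppen.insert(i, (key, [name]))
--     return dict(gruppen)
-- ===== Notes on version B (the rewrite author's own statement) =====
-- stated objective: alternative
-- what changed: B replaces A's defaultdict grouping followed by a final dict(sorted(...)) with a single pass that maintains an always-sorted association list via in-place sorted insertion (linear scan to the insertion point), so no sort step exists at all.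
import Mathlib
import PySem

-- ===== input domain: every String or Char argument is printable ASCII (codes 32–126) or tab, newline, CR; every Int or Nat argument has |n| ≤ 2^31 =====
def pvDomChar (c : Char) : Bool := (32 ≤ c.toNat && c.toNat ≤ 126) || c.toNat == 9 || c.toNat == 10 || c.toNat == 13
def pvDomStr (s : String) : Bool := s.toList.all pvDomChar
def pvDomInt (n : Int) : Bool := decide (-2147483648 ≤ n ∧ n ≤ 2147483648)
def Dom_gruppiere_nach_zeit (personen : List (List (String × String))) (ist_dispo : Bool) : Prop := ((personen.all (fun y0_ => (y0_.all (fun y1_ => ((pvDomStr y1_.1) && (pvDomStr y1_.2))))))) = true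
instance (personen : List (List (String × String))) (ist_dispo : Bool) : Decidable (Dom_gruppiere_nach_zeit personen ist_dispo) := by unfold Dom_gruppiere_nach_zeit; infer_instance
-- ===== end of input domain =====

-- B replaces A's defaultdict grouping + final dict(sorted(...)) by one pass over personen that keeps an
-- always-sorted association list via sorted insertion, so no sort step exists (objective: alternative).

-- ===== PORT A =====
-- p.get(k) on the dict-as-association-list: first match
def pvGet (p : List (String × String)) (k : String) : Option String :=
  (p.find? (fun q => q.1 == k)).map (·.2)

-- p.get('ist_krank') in (True, 'True'): values are strings here, so only 'True' can match
def pvKrank (p : List (String × String)) : Bool := pvGet p "ist_krank" == some "True"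

-- (roh or '')[:5], then in dispo mode f"{int(t.split(':')[0]):02d}:00" (f"{n:02d}" = str(n).zfill(2));
-- int() may raise ValueError in Python: the port falls back to 0 there and Pre_ excludes exactly those inputs
def pvTeil (roh : Option String) (ist_dispo : Bool) : String :=
  if ist_dispo && (!(PySem.Str.slice (roh.getD "") none (some 5) == "")) &&
      PySem.Str.isIn ":" (PySem.Str.slice (roh.getD "") none (some 5)) then
    PySem.Str.join "" [PySem.Str.zfill (PySem.Int.toStr ((PySem.Int.ofStr? (((PySem.Str.split? (PySem.Str.slice (roh.getD "") none (some 5)) ":").getD []).headD "")).getD 0)) 2, ":00"]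
  else PySem.Str.slice (roh.getD "") none (some 5)

-- f"{start} – {end}"  (en dash, as in the source)
def pvSchluessel (p : List (String × String)) (ist_dispo : Bool) : String :=
  PySem.Str.join "" [pvTeil (pvGet p "start_zeit") ist_dispo, " – ", pvTeil (pvGet p "end_zeit") ist_dispo]

-- dict(sorted(gruppen.items())): the dict's keys are distinct, so Python's tuple sort never reaches the
-- second components — sorting the items by the key alone is exact
def gruppiere_nach_zeit (personen : List (List (String × String))) (ist_dispo : Bool) : List (String × List String) :=
  let gruppen : PySem.Dict String (List String) :=
    personen.foldl
      (fun d p =>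
        if pvKrank p then d
        else d.modify (pvSchluessel p ist_dispo) [] (fun v => v ++ [(pvGet p "anzeigename").getD ""]))
      PySem.Dict.empty
  PySem.List.sorted gruppen.items (fun kv => kv.1) false

-- ===== PORT B =====
-- B's own helper _fenster: (roh or '')[:5]; '' contains no ':', so B tests only ':' in t
-- ('%02d' % n = str(n).zfill(2)); the same int() fallback-to-0 as in port A, excluded by Pre_
def bFenster (roh : Option String) (ist_dispo : Bool) : String :=
  if ist_dispo && PySem.Str.isIn ":" (PySem.Str.slice (roh.getD "") none (some 5)) then
    PySem.Str.join "" [PySem.Str.zfill (PySem.Int.toStr ((PySem.Int.ofStr? (((PySem.Str.split? (PySem.Str.slice (roh.getD "") none (some 5)) ":").getD []).headD "")).getD 0)) 2, ":00"]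
  else PySem.Str.slice (roh.getD "") none (some 5)

-- the while-loop + insert/append of Source B: walk past entries with smaller keys, then append the
-- name to the matching group or insert a fresh group at this position
def bEinf (gruppen : List (String × List String)) (key name : String) : List (String × List String) :=
  match gruppen with
  | [] => [(key, [name])]
  | (k, ns) :: rest =>
    if k < key then (k, ns) :: bEinf rest key name
    else if k = key then (k, ns ++ [name]) :: rest
    else (key, [name]) :: (k, ns) :: rest

def gruppiere_nach_zeit_alt (personen : List (List (String × String))) (ist_dispo : Bool) : List (String × List String) :=
  personen.foldl
    (fun gruppen p =>
      if (p.find? (fun q => q.1 == "ist_krank")).map (·.2) == some "True" then gruppen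
      else
        bEinf gruppen
          (PySem.Str.join "" [bFenster ((p.find? (fun q => q.1 == "start_zeit")).map (·.2)) ist_dispo, " – ",
                              bFenster ((p.find? (fun q => q.1 == "end_zeit")).map (·.2)) ist_dispo])
          (((p.find? (fun q => q.1 == "anzeigename")).map (·.2)).getD ""))
    []

-- ===== PRECONDITION & SPEC =====
-- Pre_ excludes exactly the inputs where Python's int(t.split(':')[0]) raises ValueError (in dispo mode,
-- on a non-sick person whose truncated start/end time contains ':' but no int-parsable first piece);
-- Python A (and Python B alike) raises there, so nothing A returns on is excluded.
def Pre_gruppiere_nach_zeit (personen : List (List (String × String))) (ist_dispo : Bool) : Prop :=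
  ist_dispo = true →
    ∀ p ∈ personen, pvKrank p = false →
      ∀ feld ∈ ["start_zeit", "end_zeit"],
        ((!(PySem.Str.slice ((pvGet p feld).getD "") none (some 5) == "")) &&
            PySem.Str.isIn ":" (PySem.Str.slice ((pvGet p feld).getD "") none (some 5))) = true →
          (PySem.Int.ofStr?
              (((PySem.Str.split? (PySem.Str.slice ((pvGet p feld).getD "") none (some 5)) ":").getD []).headD "")).isSome = true

instance (personen : List (List (String × String))) (ist_dispo : Bool) : Decidable (Pre_gruppiere_nach_zeit personen ist_dispo) := by unfold Pre_gruppiere_nach_zeit; infer_instance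

def pvWitness_gruppiere_nach_zeit : (List (List (String × String))) × Bool :=
  ([[("anzeigename", "Anna"), ("start_zeit", "08:15"), ("end_zeit", "09:30")],
    [("anzeigename", "Bob"), ("ist_krank", "True"), ("start_zeit", "xx:yy")]], true)

def Spec_gruppiere_nach_zeit (personen : List (List (String × String))) (ist_dispo : Bool) (out : List (String × List String)) : Prop := out = gruppiere_nach_zeit_alt personen ist_dispo
instance (personen : List (List (String × String))) (ist_dispo : Bool) (out : List (String × List String)) : Decidable (Spec_gruppiere_nach_zeit personen ist_dispo out) := by unfold Spec_gruppiere_nach_zeit; infer_instance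

-- ===== CLAIM (what is proved, stated in full; the proofs are below) =====
def Claim_equal_gruppiere_nach_zeit : Prop := ∀ (personen : List (List (String × String))) (ist_dispo : Bool), Dom_gruppiere_nach_zeit personen ist_dispo → Pre_gruppiere_nach_zeit personen ist_dispo → Spec_gruppiere_nach_zeit personen ist_dispo (gruppiere_nach_zeit personen ist_dispo)

-- ===== LEMMAS AND PROOFS =====

-- assoc-list lookup (first match) and strict sortedness by key
def pvLk (l : List (String × List String)) (k : String) : Option (List String) :=
  (l.find? (fun q => q.1 == k)).map (·.2)

def pvSorted (l : List (String × List String)) : Prop :=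
  l.Pairwise (fun a b => a.1 < b.1)

theorem pvLk_cons (q : String × List String) (t : List (String × List String)) (k : String) :
    pvLk (q :: t) k = if q.1 = k then some q.2 else pvLk t k := by
  by_cases h : q.1 = k
  · simp [pvLk, List.find?_cons, h]
  · simp [pvLk, List.find?_cons, h, show (q.1 == k) = false from by simp [h]]

theorem pvLk_some_mem (l : List (String × List String)) (k : String) (v : List String)
    (h : pvLk l k = some v) : ∃ q ∈ l, q.1 = k := by
  unfold pvLk at h
  cases hf : l.find? (fun q => q.1 == k) with
  | none => rw [hf] at h; simp at h
  | some q =>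
    have hm := List.mem_of_find?_eq_some hf
    have hp := List.find?_some hf
    exact ⟨q, hm, by simpa using hp⟩

-- in a strictly sorted cons, the head key does not reappear in the tail
theorem pvLk_tail_none (q : String × List String) (t : List (String × List String))
    (h : pvSorted (q :: t)) : pvLk t q.1 = none := by
  obtain ⟨hh, _⟩ := List.pairwise_cons.mp h
  have hf : t.find? (fun x => x.1 == q.1) = none :=
    List.find?_eq_none.mpr (fun x hx => by
      simp only [beq_iff_eq]
      intro e
      exact absurd (hh x hx) (by rw [e]; exact lt_irrefl _))
  simp [pvLk, hf]

-- two strictly sorted assoc lists with the same lookup function are equal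
theorem pvLk_ext : ∀ (l1 l2 : List (String × List String)), pvSorted l1 → pvSorted l2 →
    (∀ k, pvLk l1 k = pvLk l2 k) → l1 = l2 := by
  intro l1
  induction l1 with
  | nil =>
    intro l2 _ _ h
    cases l2 with
    | nil => rfl
    | cons b t2 =>
      have hb := h b.1
      rw [pvLk_cons] at hb
      simp [pvLk] at hb
  | cons a t1 ih =>
    intro l2 h1 h2 h
    cases l2 with
    | nil =>
      have ha := h a.1
      rw [pvLk_cons] at ha
      simp [pvLk] at ha
    | cons b t2 =>
      obtain ⟨hh1, ht1⟩ := List.pairwise_cons.mp h1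
      obtain ⟨hh2, ht2⟩ := List.pairwise_cons.mp h2
      have hab : a.1 = b.1 := by
        by_contra hne
        have hx := h a.1
        rw [pvLk_cons, pvLk_cons] at hx
        simp [Ne.symm hne] at hx
        obtain ⟨qq, hq, hqk⟩ := pvLk_some_mem t2 a.1 a.2 hx.symm
        have hba := hh2 qq hq
        rw [hqk] at hba
        have hy := h b.1
        rw [pvLk_cons, pvLk_cons] at hy
        simp [hne] at hy
        obtain ⟨r, hr, hrk⟩ := pvLk_some_mem t1 b.1 b.2 hy
        have hab' := hh1 r hr
        rw [hrk] at hab'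
        exact absurd (lt_trans hba hab') (lt_irrefl _)
      have hv : a.2 = b.2 := by
        have ha := h a.1
        rw [pvLk_cons, pvLk_cons] at ha
        simp [hab] at ha
        exact ha
      have htl : ∀ k, pvLk t1 k = pvLk t2 k := by
        intro k
        by_cases hk : k = a.1
        · subst hk
          rw [pvLk_tail_none a t1 h1, hab, pvLk_tail_none b t2 h2]
        · have hx := h k
          rw [pvLk_cons, pvLk_cons, if_neg (Ne.symm hk),
            if_neg (by rw [← hab]; exact Ne.symm hk)] at hx
          exact hx
      rw [ih t2 ht1 ht2 htl]
      congr 1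
      exact Prod.ext_iff.mpr ⟨hab, hv⟩

-- every key of bEinf gr k n is k or a key of gr
theorem bEinf_mem_key (gr : List (String × List String)) (k n : String) (x : String × List String)
    (hx : x ∈ bEinf gr k n) : x.1 = k ∨ ∃ y ∈ gr, x.1 = y.1 := by
  induction gr with
  | nil =>
    simp [bEinf] at hx
    left; rw [hx]
  | cons q t ih =>
    simp only [bEinf] at hx
    split_ifs at hx with h1 h2
    · rcases List.mem_cons.mp hx with h | h
      · right; exact ⟨q, by simp, by rw [h]⟩
      · rcases ih h with h' | ⟨y, hy, he⟩
        · exact Or.inl h'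
        · exact Or.inr ⟨y, List.mem_cons_of_mem _ hy, he⟩
    · rcases List.mem_cons.mp hx with h | h
      · right; exact ⟨q, by simp, by rw [h]⟩
      · exact Or.inr ⟨x, List.mem_cons_of_mem _ h, rfl⟩
    · rcases List.mem_cons.mp hx with h | h
      · exact Or.inl (by rw [h])
      · exact Or.inr ⟨x, h, rfl⟩

-- sorted insertion preserves sortedness
theorem bEinf_sorted (gr : List (String × List String)) (k n : String) (h : pvSorted gr) :
    pvSorted (bEinf gr k n) := by
  induction gr with
  | nil => simp [bEinf, pvSorted]
  | cons q t ih =>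
    obtain ⟨hh, ht⟩ := List.pairwise_cons.mp h
    simp only [bEinf]
    split_ifs with h1 h2
    · refine List.pairwise_cons.mpr ⟨?_, ih ht⟩
      intro x hx
      rcases bEinf_mem_key t k n x hx with e | ⟨y, hy, e⟩
      · rw [e]; exact h1
      · rw [e]; exact hh y hy
    · exact List.pairwise_cons.mpr ⟨hh, ht⟩
    · have hlt : k < q.1 := lt_of_le_of_ne (not_lt.mp h1) (Ne.symm h2)
      refine List.pairwise_cons.mpr ⟨?_, List.pairwise_cons.mpr ⟨hh, ht⟩⟩
      intro x hx
      rcases List.mem_cons.mp hx with e | hxt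
      · rw [e]; exact hlt
      · exact lt_trans hlt (hh x hxt)

-- lookup after sorted insertion
theorem bEinf_lk (gr : List (String × List String)) (k n : String) (h : pvSorted gr) (k' : String) :
    pvLk (bEinf gr k n) k' =
      if k' = k then some ((pvLk gr k).getD [] ++ [n]) else pvLk gr k' := by
  induction gr with
  | nil =>
    by_cases hk : k' = k
    · subst hk; simp [bEinf, pvLk]
    · simp [bEinf, pvLk, hk, Ne.symm hk]
  | cons q t ih =>
    obtain ⟨hh, ht⟩ := List.pairwise_cons.mp h
    simp only [bEinf]
    by_cases h1 : q.1 < k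
    · rw [if_pos h1]
      have hqk : q.1 ≠ k := ne_of_lt h1
      simp only [pvLk_cons, ih ht]
      by_cases h3 : k' = k
      · simp [h3, hqk, show q.1 ≠ k' from h3 ▸ hqk]
      · simp [h3]
    · rw [if_neg h1]
      by_cases h2 : q.1 = k
      · rw [if_pos h2]
        simp only [pvLk_cons]
        by_cases h3 : k' = k
        · simp [h3, h2]
        · simp [h3, show q.1 ≠ k' from fun e => h3 (by rw [← e, h2])]
      · rw [if_neg h2]
        have hlt : k < q.1 := lt_of_le_of_ne (not_lt.mp h1) (Ne.symm h2)
        simp only [pvLk_cons]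
        by_cases h3 : k' = k
        · have htn : pvLk t k = none := by
            have hf : t.find? (fun x => x.1 == k) = none :=
              List.find?_eq_none.mpr (fun x hx => by
                simp only [beq_iff_eq]
                intro e
                exact absurd (lt_trans hlt (hh x hx)) (by rw [e]; exact lt_irrefl _))
            simp [pvLk, hf]
          simp [h3, htn, h2, show q.1 ≠ k' from h3 ▸ fun e => h2 e]
        · simp [h3, Ne.symm h3]

-- lookup in a list built by mapping over keys
theorem pvLk_map (l : List String) (f : String → List String) (k : String) :
    pvLk (l.map (fun x => (x, f x))) k = if k ∈ l then some (f k) else none := by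
  induction l with
  | nil => simp [pvLk]
  | cons a t ih =>
    rw [List.map_cons, pvLk_cons, ih]
    by_cases h : a = k
    · subst h; simp
    · simp [h, Ne.symm h]

-- the canonical grouping of a flat (key, name) list
def pvG (ps : List (String × String)) : List (String × List String) :=
  (PySem.List.sorted (PySem.Set.ofList (ps.map (·.1))) (fun k => k) false).map
    (fun k => (k, (ps.filter (fun x => x.1 == k)).map (·.2)))

theorem pvG_sorted (ps : List (String × String)) : pvSorted (pvG ps) := by
  unfold pvG pvSorted
  rw [List.pairwise_map]
  have h1 : (PySem.List.sorted (PySem.Set.ofList (ps.map (·.1))) (fun k => k) false).Pairwise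
      (fun a b : String => a ≤ b) := PySem.List.sorted_pairwise _ _
  have h2 : (PySem.List.sorted (PySem.Set.ofList (ps.map (·.1))) (fun k => k) false).Nodup :=
    (PySem.List.sorted_perm _ _ _).nodup_iff.mpr (PySem.Set.nodup_ofList _)
  exact (h1.and h2).imp (fun h => lt_of_le_of_ne h.1 h.2)

theorem pvG_lk (ps : List (String × String)) (k : String) :
    pvLk (pvG ps) k =
      if k ∈ ps.map (·.1) then some ((ps.filter (fun x => x.1 == k)).map (·.2)) else none := by
  unfold pvG
  rw [pvLk_map]
  have hmem : k ∈ PySem.List.sorted (PySem.Set.ofList (ps.map (·.1))) (fun k => k) false ↔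
      k ∈ ps.map (·.1) := by
    rw [PySem.List.mem_sorted, PySem.Set.mem_ofList]
  by_cases h : k ∈ ps.map (·.1)
  · rw [if_pos (hmem.mpr h), if_pos h]
  · rw [if_neg (fun c => h (hmem.mp c)), if_neg h]

-- B's fold of sorted insertions computes the canonical grouping
theorem bFold_eq_pvG (ps : List (String × String)) :
    ps.foldl (fun gr q => bEinf gr q.1 q.2) [] = pvG ps := by
  induction ps using List.reverseRecOn with
  | nil => rfl
  | append_singleton qs q ih =>
    rw [List.foldl_append, List.foldl_cons, List.foldl_nil, ih]
    apply pvLk_ext _ _ (bEinf_sorted _ _ _ (pvG_sorted qs)) (pvG_sorted _)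
    intro k
    rw [bEinf_lk _ _ _ (pvG_sorted qs), pvG_lk, pvG_lk, pvG_lk]
    by_cases hk : k = q.1
    · by_cases hm : q.1 ∈ qs.map (·.1)
      · simp [hk, hm, List.filter_cons]
      · have hf : qs.filter (fun x => x.1 == q.1) = [] := by
          rw [List.filter_eq_nil_iff]
          intro x hx
          simp only [beq_iff_eq]
          intro e
          exact hm (List.mem_map.mpr ⟨x, hx, e⟩)
        simp [hk, hm, hf, List.filter_cons]
    · by_cases hm : k ∈ qs.map (·.1)
      · simp [hk, hm, List.filter_cons, Ne.symm hk]
      · simp [hk, hm, List.filter_cons, Ne.symm hk]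

-- A's grouping loop, rewritten as a fold of the dict-step over the flat (key, name) list
theorem pv_fold_eq (personen : List (List (String × String))) (ist_dispo : Bool) :
    personen.foldl
      (fun d p =>
        if pvKrank p then d
        else d.modify (pvSchluessel p ist_dispo) [] (fun v => v ++ [(pvGet p "anzeigename").getD ""]))
      (PySem.Dict.empty : PySem.Dict String (List String))
    = ((personen.filter (fun p => !pvKrank p)).map
        (fun p => (pvSchluessel p ist_dispo, (pvGet p "anzeigename").getD ""))).foldl
        (fun d q => d.modify q.1 [] (fun v => v ++ [q.2])) PySem.Dict.empty := by
  rw [List.foldl_map]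
  rw [← PySem.List.foldl_if_eq_foldl_filter (p := fun p => !pvKrank p)]
  apply PySem.List.foldl_congr_mem
  intro acc p _
  cases h : pvKrank p <;> simp [h]

-- A equals the canonical grouping of its flat pair list
theorem pvA_eq_pvG (personen : List (List (String × String))) (ist_dispo : Bool) :
    gruppiere_nach_zeit personen ist_dispo =
      pvG ((personen.filter (fun p => !pvKrank p)).map
            (fun p => (pvSchluessel p ist_dispo, (pvGet p "anzeigename").getD ""))) := by
  simp only [gruppiere_nach_zeit]
  rw [pv_fold_eq]
  set ps := (personen.filter (fun p => !pvKrank p)).map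
      (fun p => (pvSchluessel p ist_dispo, (pvGet p "anzeigename").getD "")) with hps
  set d := ps.foldl (fun d q => d.modify q.1 [] (fun v => v ++ [q.2]))
      (PySem.Dict.empty : PySem.Dict String (List String)) with hd
  have hkeys : d.keys = PySem.Set.ofList (ps.map (·.1)) := by
    rw [hd, PySem.Dict.keys_foldl_modify_key (key := fun q : String × String => q.1)
          (f := fun _ q => fun v => v ++ [q.2])]
    simp [PySem.Dict.keys_empty, PySem.Set.update, PySem.Set.ofList_eq_foldl]
  have hnd : d.keys.Nodup := by
    rw [hkeys]; exact PySem.Set.nodup_ofList _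
  have hitems : d.items = (PySem.Set.ofList (ps.map (·.1))).map
      (fun k => (k, (ps.filter (fun x => x.1 == k)).map (·.2))) := by
    rw [PySem.Dict.items_eq_map_keys d hnd ([] : List String), hkeys]
    apply List.map_congr_left
    intro k _
    rw [hd, PySem.Dict.getD_foldl_modify_append]
    simp [PySem.Dict.getD_empty]
  rw [hitems]
  apply PySem.List.sorted_eq_of_perm_of_pairwise_lt
  · exact (PySem.List.sorted_perm _ _ _).map _
  · exact pvG_sorted ps

-- bFenster only drops A's redundant emptiness test (the empty string contains no ':')
theorem bFenster_eq_pvTeil (roh : Option String) (d : Bool) : bFenster roh d = pvTeil roh d := by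
  unfold bFenster pvTeil
  by_cases he : PySem.Str.slice (roh.getD "") none (some 5) = ""
  · rw [he]
    cases d <;> decide
  · simp [he]

-- B's fold over personen is the pair-list fold of bEinf
theorem pvB_eq_fold (personen : List (List (String × String))) (ist_dispo : Bool) :
    gruppiere_nach_zeit_alt personen ist_dispo =
      ((personen.filter (fun p => !pvKrank p)).map
        (fun p => (pvSchluessel p ist_dispo, (pvGet p "anzeigename").getD ""))).foldl
        (fun gr q => bEinf gr q.1 q.2) [] := by
  unfold gruppiere_nach_zeit_alt
  rw [List.foldl_map, ← PySem.List.foldl_if_eq_foldl_filter (p := fun p => !pvKrank p)]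
  apply PySem.List.foldl_congr_mem
  intro acc p _
  have hk : ((p.find? (fun q => q.1 == "ist_krank")).map (·.2) == some "True") = pvKrank p := rfl
  rw [hk, bFenster_eq_pvTeil, bFenster_eq_pvTeil]
  cases h : pvKrank p
  · simp [h, pvSchluessel, pvGet]
  · simp [h]

-- ===== VERDICT (by name: the statement is the Claim_ definition above) =====
theorem gruppiere_nach_zeit_spec : Claim_equal_gruppiere_nach_zeit := by
  intro personen ist_dispo _ _
  unfold Spec_gruppiere_nach_zeit
  rw [pvA_eq_pvG, pvB_eq_fold, bFold_eq_pvG]
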